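-- pv_equiv track=rewrite | github.com/Ghostmok/SMFresh | Graph_Operation.py | find_6n6e_subgraph
-- ===== SOURCE A (Python) =====
-- def find_6n6e_subgraph(graph):
--     #         a
--     #        / \
--     #       /   \
--     #      b     c
--     #     /       \
--     #    /         \
--     #   d-----f-----e
--     for start_node in sorted(graph.keys()):
--         stack = [(start_node, [start_node])]
--         while stack:
--             current_node, path = stack.pop()
--             if len(path) == 6:
--                 if start_node in graph[current_node]:
--                     nodes_set = set(path)
--                     edges_set = set()
--                     for i in range(len(path) - 1):
--                         edges_set.add(tuple(sorted((path[i], path[i + 1]))))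
--                     edges_set.add(tuple(sorted((path[-1], start_node))))
--                     return nodes_set, edges_set
--                 continue
--             for neighbor in graph[current_node]:
--                 if neighbor not in path:
--                     new_path = path + [neighbor]
--                     stack.append((neighbor, new_path))
--     return None, None
-- ===== SOURCE B (Python) =====
-- def find_6n6e_subgraph(graph):
--     def dfs(start, current, path):
--         if len(path) >= 6:
--             if start in graph[current]:
--                 return path
--             return None
--         return next((r for r in (dfs(start, n, path + [n])
--                                  for n in reversed(graph[current]) if n not in path)
--                      if r is not None), None)
--
--     for start in sorted(graph):
--         path = dfs(start, start, [start])
--         if path is not None: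
--             nodes_set = set(path)
--             edges_set = {tuple(sorted(e)) for e in zip(path, path[1:] + [start])}
--             return nodes_set, edges_set
--     return None, None
-- ===== Notes on version B (the rewrite author's own statement) =====
-- stated objective: alternative
-- what changed: A's explicit LIFO stack loop is replaced by a recursive depth-first helper that visits neighbors in reversed order (matching the stack's pop order) and builds the edge set from zip(path, path[1:]+[start]) instead of an index loop.
import Mathlib
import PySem

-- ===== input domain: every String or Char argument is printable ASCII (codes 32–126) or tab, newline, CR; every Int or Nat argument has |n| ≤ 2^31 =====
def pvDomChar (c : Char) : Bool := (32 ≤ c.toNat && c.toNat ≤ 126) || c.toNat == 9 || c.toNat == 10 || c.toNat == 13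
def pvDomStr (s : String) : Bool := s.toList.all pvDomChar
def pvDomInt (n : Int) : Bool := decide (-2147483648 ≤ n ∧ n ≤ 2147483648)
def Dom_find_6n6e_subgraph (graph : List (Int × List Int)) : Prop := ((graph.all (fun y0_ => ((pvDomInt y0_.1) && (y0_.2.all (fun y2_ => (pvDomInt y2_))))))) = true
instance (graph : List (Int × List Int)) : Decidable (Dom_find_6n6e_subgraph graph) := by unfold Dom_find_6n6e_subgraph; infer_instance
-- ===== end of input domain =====

-- B is a recursive depth-first search (neighbors taken in reversed order, matching A's
-- LIFO stack) instead of A's explicit stack loop; objective: alternative decomposition.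

-- shared tiny helper: tuple(sorted((a, b))) for two ints (exact: sorted of a 2-list)
def pvEdge (a b : Int) : Int × Int := if a ≤ b then (a, b) else (b, a)

-- ===== PORT A =====
-- edges_set built by A's loop: for i in range(len(path)-1): add(sorted pair); then add((path[-1], start))
def pvEdgesA (path : List Int) (start : Int) : List (Int × Int) :=
  PySem.Set.add
    ((PySem.List.pyRange 0 ((path.length : Int) - 1) 1).foldl
      (fun es i =>
        PySem.Set.add es (pvEdge (PySem.List.pyGetD path i 0) (PySem.List.pyGetD path (i + 1) 0)))
      PySem.Set.empty)
    (pvEdge (PySem.List.pyGetD path (-1) 0) start)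

-- fuel for A's while loop (the loop terminates because paths are simple and cut off at
-- length 6; this bound is proved sufficient below, so the fuel guard never fires)
def pvFuel (d : PySem.Dict Int (List Int)) : Nat :=
  ((d.items.map (fun p => p.2.length)).sum + 1) ^ 6

-- A's while loop over the explicit stack (head of the list = top of the stack; pushing
-- the neighbors in order = foldl that conses, exactly Python's append/pop())
def pvLoopA (d : PySem.Dict Int (List Int)) (start : Int) :
    Nat → List (Int × List Int) → Option (List Int)
  | 0, _ => none
  | _ + 1, [] => none
  | f + 1, (cur, path) :: rest =>
      let adj := d.getD cur []
      if path.length = 6 then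
        if start ∈ adj then some path else pvLoopA d start f rest
      else
        pvLoopA d start f
          (adj.foldl (fun st n => if n ∈ path then st else (n, path ++ [n]) :: st) rest)

-- A's outer loop: for start_node in sorted(graph.keys()); on success build the two sets
def pvOuterA (d : PySem.Dict Int (List Int)) :
    List Int → Option (List Int) × Option (List (Int × Int))
  | [] => (none, none)
  | s :: rest =>
      match pvLoopA d s (pvFuel d) [(s, [s])] with
      | some path => (some (PySem.Set.ofList path), some (pvEdgesA path s))
      | none => pvOuterA d rest

def find_6n6e_subgraph (graph : List (Int × List Int)) :
    Option (List Int) × (Option (List (Int × Int))) :=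
  let d := PySem.Dict.ofList graph
  pvOuterA d (PySem.List.sorted d.keys (fun x => x) false)

-- ===== PORT B =====
-- first r in the generator that is not None (next((r for r in … if r is not None), None))
def pvFirst {α : Type} : List (Option α) → Option α
  | [] => none
  | some r :: _ => some r
  | none :: t => pvFirst t

-- B's recursive dfs(start, current, path)
def pvDfsB (d : PySem.Dict Int (List Int)) (start cur : Int) (path : List Int) :
    Option (List Int) :=
  if h : 6 ≤ path.length then
    if start ∈ d.getD cur [] then some path else none
  else
    pvFirst
      (((d.getD cur []).reverse.filter (fun n => decide (n ∉ path))).attach.map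
        (fun n => pvDfsB d start n.1 (path ++ [n.1])))
termination_by 6 - path.length
decreasing_by simp only [List.length_append, List.length_cons, List.length_nil]; omega

-- B's outer loop: for start in sorted(graph); sets built from zip(path, path[1:] + [start])
def pvRunB (d : PySem.Dict Int (List Int)) :
    List Int → Option (List Int) × Option (List (Int × Int))
  | [] => (none, none)
  | s :: rest =>
      match pvDfsB d s s [s] with
      | some path =>
          (some (PySem.Set.ofList path),
           some (PySem.Set.ofList
              ((path.zip (path.drop 1 ++ [s])).map (fun e => pvEdge e.1 e.2))))
      | none => pvRunB d rest

def find_6n6e_subgraph_alt (graph : List (Int × List Int)) :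
    Option (List Int) × (Option (List (Int × Int))) :=
  let d := PySem.Dict.ofList graph
  pvRunB d (PySem.List.sorted d.keys (fun x => x) false)

-- ===== PRECONDITION & SPEC =====
-- effective adjacency of the input dict (last binding wins, as in Python's dict())
def pvAdjP (graph : List (Int × List Int)) (k : Int) : List Int :=
  (((graph.reverse).find? (fun p => p.1 == k)).map (fun p => p.2)).getD []

-- Pre_ excludes graphs on which Python raises KeyError at graph[neighbor] for a dangling
-- neighbor (one that is not a key): it admits graphs whose neighbors are all keys, and
-- graphs where the search from the minimal key returns a 6-cycle before any dangling
-- neighbor can be dereferenced (no dangler on a simple path of at most 5 edges from it).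
def Pre_find_6n6e_subgraph (graph : List (Int × List Int)) : Prop :=
  (∀ p ∈ graph, ∀ n ∈ p.2, ∃ q ∈ graph, q.1 = n)
  ∨ (∃ m ∈ graph.map (fun p => p.1),
      (∀ k ∈ graph.map (fun p => p.1), m ≤ k) ∧
      (∃ v1 ∈ pvAdjP graph m, v1 ≠ m ∧
        ∃ v2 ∈ pvAdjP graph v1, (v2 ≠ m ∧ v2 ≠ v1) ∧
        ∃ v3 ∈ pvAdjP graph v2, (v3 ≠ m ∧ v3 ≠ v1 ∧ v3 ≠ v2) ∧
        ∃ v4 ∈ pvAdjP graph v3, (v4 ≠ m ∧ v4 ≠ v1 ∧ v4 ≠ v2 ∧ v4 ≠ v3) ∧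
        ∃ v5 ∈ pvAdjP graph v4, (v5 ≠ m ∧ v5 ≠ v1 ∧ v5 ≠ v2 ∧ v5 ≠ v3 ∧ v5 ≠ v4) ∧
        m ∈ pvAdjP graph v5) ∧
      (∀ v1 ∈ pvAdjP graph m, v1 ≠ m →
        (∃ q ∈ graph, q.1 = v1) ∧
        ∀ v2 ∈ pvAdjP graph v1, ¬(v2 = m ∨ v2 = v1) →
          (∃ q ∈ graph, q.1 = v2) ∧
          ∀ v3 ∈ pvAdjP graph v2, ¬(v3 = m ∨ v3 = v1 ∨ v3 = v2) →
            (∃ q ∈ graph, q.1 = v3) ∧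
            ∀ v4 ∈ pvAdjP graph v3, ¬(v4 = m ∨ v4 = v1 ∨ v4 = v2 ∨ v4 = v3) →
              (∃ q ∈ graph, q.1 = v4) ∧
              ∀ v5 ∈ pvAdjP graph v4, ¬(v5 = m ∨ v5 = v1 ∨ v5 = v2 ∨ v5 = v3 ∨ v5 = v4) →
                (∃ q ∈ graph, q.1 = v5)))
instance (graph : List (Int × List Int)) : Decidable (Pre_find_6n6e_subgraph graph) := by
  unfold Pre_find_6n6e_subgraph; infer_instance

def pvWitness_find_6n6e_subgraph : (List (Int × List Int)) :=
  [(0, [1]), (1, [2]), (2, [3]), (3, [4]), (4, [5]), (5, [0])]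

def Spec_find_6n6e_subgraph (graph : List (Int × List Int)) (out : Option (List Int) × (Option (List (Int × Int)))) : Prop := out = find_6n6e_subgraph_alt graph
instance (graph : List (Int × List Int)) (out : Option (List Int) × (Option (List (Int × Int)))) : Decidable (Spec_find_6n6e_subgraph graph out) := by unfold Spec_find_6n6e_subgraph; infer_instance

-- ===== CLAIM (what is proved, stated in full; the proofs are below) =====
def Claim_equal_find_6n6e_subgraph : Prop := ∀ (graph : List (Int × List Int)), Dom_find_6n6e_subgraph graph → Pre_find_6n6e_subgraph graph → Spec_find_6n6e_subgraph graph (find_6n6e_subgraph graph)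

-- ===== LEMMAS AND PROOFS =====

theorem pvFirst_cons {α : Type} (o : Option α) (t : List (Option α)) :
    pvFirst (o :: t) = match o with | some r => some r | none => pvFirst t := by
  cases o <;> rfl

theorem pvFirst_append {α : Type} (xs ys : List (Option α)) :
    pvFirst (xs ++ ys) = match pvFirst xs with | some r => some r | none => pvFirst ys := by
  induction xs with
  | nil => rfl
  | cons o t ih => cases o <;> simp [pvFirst, ih]

theorem pvFirst_some_mem {α : Type} (l : List (Option α)) (r : α)
    (h : pvFirst l = some r) : some r ∈ l := by
  induction l with
  | nil => simp [pvFirst] at h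
  | cons o t ih =>
    cases o with
    | some x => simp [pvFirst] at h; simp [h]
    | none => simp [pvFirst] at h; exact List.mem_cons_of_mem _ (ih h)

-- the stack push of A's inner for-loop, in closed form
theorem pvFoldlPush (path : List Int) (l : List Int) (acc : List (Int × List Int)) :
    l.foldl (fun st n => if n ∈ path then st else (n, path ++ [n]) :: st) acc
      = ((l.filter (fun n => decide (n ∉ path))).reverse.map
          (fun n => (n, path ++ [n]))) ++ acc := by
  induction l generalizing acc with
  | nil => rfl
  | cons n t ih =>
    by_cases hn : n ∈ path <;> simp [hn, ih]

-- cost of fully processing one stack entry (number of loop iterations it generates)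
def pvCost (d : PySem.Dict Int (List Int)) : Nat → Int × List Int → Nat
  | 0, _ => 1
  | k + 1, (cur, path) =>
      if path.length = 6 then 1
      else 1 + (((d.getD cur []).filter (fun n => decide (n ∉ path))).map
            (fun n => pvCost d k (n, path ++ [n]))).sum

theorem pvCost_pos (d : PySem.Dict Int (List Int)) (k : Nat) (e : Int × List Int) :
    1 ≤ pvCost d k e := by
  cases k with
  | zero => simp [pvCost]
  | succ k => obtain ⟨cur, path⟩ := e; simp [pvCost]; split <;> omega

theorem pvAdjLen_le (d : PySem.Dict Int (List Int)) (k : Int) :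
    (d.getD k []).length ≤ (d.items.map (fun p => p.2.length)).sum := by
  unfold PySem.Dict.getD PySem.Dict.get?
  cases hf : d.items.find? (fun p => p.1 == k) with
  | none => simp
  | some pr =>
    have hm : pr ∈ d.items := List.mem_of_find?_eq_some hf
    have : pr.2.length ∈ d.items.map (fun p => p.2.length) := List.mem_map_of_mem hm
    simpa using List.single_le_sum (by intro x _; omega) _ this

theorem pvCost_le (d : PySem.Dict Int (List Int)) (k : Nat) (e : Int × List Int) :
    pvCost d k e ≤ ((d.items.map (fun p => p.2.length)).sum + 1) ^ k := by
  induction k generalizing e with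
  | zero => simp [pvCost]
  | succ k ih =>
    obtain ⟨cur, path⟩ := e
    set L := (d.items.map (fun p => p.2.length)).sum with hL
    simp only [pvCost]
    split
    · exact Nat.one_le_pow _ _ (by omega)
    · have hlen : ((d.getD cur []).filter (fun n => decide (n ∉ path))).length ≤ L :=
        le_trans (List.length_filter_le _ _) (pvAdjLen_le d cur)
      have hsum : (((d.getD cur []).filter (fun n => decide (n ∉ path))).map
            (fun n => pvCost d k (n, path ++ [n]))).sum ≤ L * (L + 1) ^ k := by
        calc _ ≤ (((d.getD cur []).filter (fun n => decide (n ∉ path))).map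
                  (fun n => pvCost d k (n, path ++ [n]))).length * ((L + 1) ^ k) := by
                apply List.sum_le_card_nsmul
                intro x hx
                obtain ⟨n, _, rfl⟩ := List.mem_map.1 hx
                exact ih _
          _ ≤ L * (L + 1) ^ k := by
                apply Nat.mul_le_mul_right
                simpa using hlen
      have hpow : (L + 1) ^ (k + 1) = L * (L + 1) ^ k + (L + 1) ^ k := by ring
      have h1 : 1 ≤ (L + 1) ^ k := Nat.one_le_pow _ _ (by omega)
      omega

-- the stack loop computes, entry by entry, what the recursive dfs computes
theorem pvLoopA_eq (d : PySem.Dict Int (List Int)) (start : Int) :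
    ∀ (f : Nat) (s : List (Int × List Int)),
      (∀ e ∈ s, e.2.length ≤ 6) →
      (s.map (fun e => pvCost d (6 - e.2.length) e)).sum ≤ f →
      pvLoopA d start f s = pvFirst (s.map (fun e => pvDfsB d start e.1 e.2)) := by
  intro f
  induction f with
  | zero =>
    intro s hinv hfuel
    cases s with
    | nil => rfl
    | cons e t =>
      exfalso
      have := pvCost_pos d (6 - e.2.length) e
      simp only [List.map_cons, List.sum_cons] at hfuel
      omega
  | succ f ih =>
    intro s hinv hfuel
    cases s with
    | nil => rfl
    | cons e rest =>
      obtain ⟨cur, path⟩ := e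
      have h6 : path.length ≤ 6 := hinv _ List.mem_cons_self
      have hrestinv : ∀ e ∈ rest, e.2.length ≤ 6 := fun e he => hinv e (List.mem_cons_of_mem _ he)
      by_cases hp : path.length = 6
      · -- the length-6 check branch
        have hc : pvCost d (6 - path.length) (cur, path) = 1 := by
          rw [hp]; rfl
        simp only [List.map_cons, List.sum_cons, hc] at hfuel
        rw [pvLoopA]
        simp only [if_pos hp, List.map_cons]
        rw [pvDfsB, dif_pos (by omega)]
        by_cases hs : start ∈ d.getD cur []
        · simp only [if_pos hs]; rfl
        · simp only [if_neg hs]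
          rw [pvFirst_cons]
          exact ih rest hrestinv (by omega)
      · -- the expansion branch
        have hlt : path.length < 6 := by omega
        rw [pvLoopA]
        simp only [if_neg hp]
        rw [pvFoldlPush]
        set children := ((d.getD cur []).filter (fun n => decide (n ∉ path))).reverse.map
            (fun n => (n, path ++ [n])) with hch
        have hchinv : ∀ e ∈ children ++ rest, e.2.length ≤ 6 := by
          intro e he
          rcases List.mem_append.1 he with h | h
          · obtain ⟨n, _, rfl⟩ := List.mem_map.1 h
            simp; omega
          · exact hrestinv e h
        have hcost : ((children ++ rest).map (fun e => pvCost d (6 - e.2.length) e)).sum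
            = (pvCost d (6 - path.length) (cur, path) - 1)
              + (rest.map (fun e => pvCost d (6 - e.2.length) e)).sum := by
          rw [List.map_append, List.sum_append]
          congr 1
          have hk : 6 - path.length = (5 - path.length) + 1 := by omega
          rw [hk]
          simp only [pvCost, if_neg hp, Nat.add_sub_cancel_left]
          rw [hch, List.map_map, List.map_reverse, List.sum_reverse]
          congr 1
          apply List.map_congr_left
          intro n _
          simp only [Function.comp]
          congr 1
          simp only [List.length_append, List.length_cons, List.length_nil]
          omega
        have hcpos := pvCost_pos d (6 - path.length) (cur, path)
        simp only [List.map_cons, List.sum_cons] at hfuel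
        rw [ih (children ++ rest) hchinv (by omega)]
        rw [List.map_append, pvFirst_append]
        have hhead : pvFirst (children.map (fun e => pvDfsB d start e.1 e.2))
            = pvDfsB d start cur path := by
          rw [pvDfsB, dif_neg (by omega), hch, List.map_map, List.filter_reverse]
          congr 1
          simp [Function.comp]
        rw [hhead, List.map_cons, pvFirst_cons]

theorem pvDfsB_len (d : PySem.Dict Int (List Int)) (start : Int) :
    ∀ (k : Nat) (path : List Int) (cur : Int) (r : List Int),
      path.length + k = 6 → pvDfsB d start cur path = some r → r.length = 6 := by
  intro k
  induction k with
  | zero =>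
    intro path cur r hlen hd
    rw [pvDfsB] at hd
    rw [dif_pos (by omega)] at hd
    split at hd
    · cases hd; omega
    · cases hd
  | succ k ih =>
    intro path cur r hlen hd
    rw [pvDfsB] at hd
    rw [dif_neg (by omega)] at hd
    have hmem := pvFirst_some_mem _ _ hd
    rw [List.mem_map] at hmem
    obtain ⟨n, _, hn⟩ := hmem
    exact ih (path ++ [n.1]) n.1 r (by simp; omega) hn

theorem pvEdges_eq (path : List Int) (s : Int) (h : path.length = 6) :
    pvEdgesA path s
      = PySem.Set.ofList ((path.zip (path.drop 1 ++ [s])).map (fun e => pvEdge e.1 e.2)) := by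
  match path, h with
  | [a,b,c,d,e,f], _ =>
    have hr : PySem.List.pyRange 0 5 1 = [0,1,2,3,4] := by decide
    simp only [pvEdgesA, List.length_cons, List.length_nil]
    norm_num
    rw [hr]
    simp [PySem.Set.ofList_eq_foldl, PySem.List.pyGetD, PySem.List.pyGet?, PySem.List.pyIdx?]

theorem pvFirst_singleton {α : Type} (o : Option α) : pvFirst [o] = o := by
  cases o <;> rfl

theorem pvOuter_eq (d : PySem.Dict Int (List Int)) :
    ∀ ks : List Int, pvOuterA d ks = pvRunB d ks := by
  intro ks
  induction ks with
  | nil => rfl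
  | cons s rest ih =>
    have key : pvLoopA d s (pvFuel d) [(s, [s])] = pvDfsB d s s [s] := by
      rw [pvLoopA_eq d s (pvFuel d) [(s, [s])]
        (by intro e he; simp at he; subst he; simp)
        (by
          simp only [List.map_cons, List.map_nil, List.sum_cons, List.sum_nil,
            List.length_cons, List.length_nil, Nat.add_zero]
          calc pvCost d (6 - 1) (s, [s])
              ≤ ((d.items.map (fun p => p.2.length)).sum + 1) ^ (6 - 1) := pvCost_le d _ _
            _ ≤ pvFuel d := Nat.pow_le_pow_right (by omega) (by omega))]
      simp only [List.map_cons, List.map_nil]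
      exact pvFirst_singleton _
    rw [pvOuterA, pvRunB, key]
    cases hres : pvDfsB d s s [s] with
    | none => exact ih
    | some path =>
      have hlen : path.length = 6 :=
        pvDfsB_len d s 5 [s] s path (by simp) hres
      simp only [pvEdges_eq path s hlen]

-- ===== VERDICT (by name: the statement is the Claim_ definition above) =====
theorem find_6n6e_subgraph_spec : Claim_equal_find_6n6e_subgraph := by
  intro graph _ _
  unfold Spec_find_6n6e_subgraph find_6n6e_subgraph find_6n6e_subgraph_alt
  exact pvOuter_eq _ _
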